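-- pv_equiv track=rewrite | github.com/Dorijan-Cirkveni/Miniprojects | italicizer.py | italicize
-- ===== SOURCE A (Python) =====
-- def italicize(s):
--     b = False
--     res = ''
--     for e in s:
--         if e == '"':
--             if b:
--                 res += '{\\i}' + e
--             else:
--                 res += e + '{i}'
--             b=not b
--         else:
--             res += e
--     return res
-- ===== SOURCE B (Python) =====
-- def italicize(s):
--     first, *rest = s.split('"')
--     return first + ''.join(
--         ('"{i}' if j % 2 == 0 else '{\\i}"') + part
--         for j, part in enumerate(rest)
--     )
-- ===== Notes on version B (the rewrite author's own statement) =====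
-- stated objective: faster
-- what changed: B splits the string on the quote character once and rebuilds it from the parts with alternating open/close tags chosen by part-index parity, replacing A's per-character Python loop (and its repeated string concatenation) with C-level str.split and str.join.
import Mathlib
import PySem

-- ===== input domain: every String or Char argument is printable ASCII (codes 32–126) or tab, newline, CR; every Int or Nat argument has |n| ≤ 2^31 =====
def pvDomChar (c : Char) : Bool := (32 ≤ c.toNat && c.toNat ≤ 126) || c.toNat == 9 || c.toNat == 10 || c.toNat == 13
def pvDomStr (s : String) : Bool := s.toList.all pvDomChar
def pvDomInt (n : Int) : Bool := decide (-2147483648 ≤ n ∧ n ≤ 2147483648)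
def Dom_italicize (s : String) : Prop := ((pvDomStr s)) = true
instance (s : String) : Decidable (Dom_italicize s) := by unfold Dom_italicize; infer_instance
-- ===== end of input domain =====

-- B rebuilds the string from s.split('"') with open/close tags chosen by part-index parity instead of A's per-character flag-toggling loop; objective: faster (constant factor, measured).

-- ===== PORT A =====
-- loop body of A: e != '"' appends e; e == '"' appends '{\i}'+e or e+'{i}' depending on the flag, then toggles it
def stepA (st : Bool × List Char) (e : Char) : Bool × List Char :=
  if e == '"' then
    if st.1 then (!st.1, st.2 ++ ['{', '\\', 'i', '}', e])
    else (!st.1, st.2 ++ [e, '{', 'i', '}'])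
  else (st.1, st.2 ++ [e])

def italicize (s : String) : String :=
  String.ofList ((s.toList.foldl stepA (false, [])).2)

-- ===== PORT B =====
-- first, *rest = s.split('"'); first + ''.join(('"{i}' if j%2==0 else '{\i}"') + part for j, part in enumerate(rest))
def italicize_alt (s : String) : String :=
  match PySem.Chars.splitOn s.toList ['"'] with
  | [] => ""  -- unreachable: str.split never returns an empty list
  | first :: rest =>
      String.ofList (first ++ PySem.Chars.join []
        ((PySem.List.enumerate rest).map
          (fun jp => (if jp.1 % 2 == 0 then ['"', '{', 'i', '}'] else ['{', '\\', 'i', '}', '"']) ++ jp.2)))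

-- ===== PRECONDITION & SPEC =====
def Spec_italicize (s : String) (out : String) : Prop := out = italicize_alt s
instance (s : String) (out : String) : Decidable (Spec_italicize s out) := by unfold Spec_italicize; infer_instance

-- ===== CLAIM (what is proved, stated in full; the proofs are below) =====
def Claim_equal_italicize : Prop := ∀ (s : String), Dom_italicize s → Spec_italicize s (italicize s)

-- ===== LEMMAS AND PROOFS =====

-- structural form of split-on-'"'
def mySplit : List Char → List (List Char)
  | [] => [[]]
  | c :: t =>
      if c = '"' then [] :: mySplit t
      else match mySplit t with
        | [] => [[c]]
        | p :: ps => (c :: p) :: ps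

theorem mySplit_ne_nil (l : List Char) : mySplit l ≠ [] := by
  cases l with
  | nil => simp [mySplit]
  | cons c t =>
      simp only [mySplit]
      split_ifs
      · simp
      · cases h : mySplit t <;> simp

theorem go_eq (fuel : Nat) (l cur : List Char) (acc : List (List Char))
    (h : l.length < fuel) :
    PySem.Chars.splitOn.go ['"'] fuel l cur acc =
      acc.reverse ++ ((cur.reverse ++ (mySplit l).headI) :: (mySplit l).tail) := by
  induction fuel generalizing l cur acc with
  | zero => omega
  | succ f ih =>
      cases l with
      | nil => simp [PySem.Chars.splitOn.go, mySplit]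
      | cons c t =>
          by_cases hc : c = '"'
          · subst hc
            rw [PySem.Chars.splitOn.go, if_pos (by simp [List.isPrefixOf])]
            have hd : List.drop (['"'].length) ('"' :: t) = t := by simp
            rw [hd, ih t [] (cur.reverse :: acc) (by simp at h; omega)]
            cases hm : mySplit t with
            | nil => exact absurd hm (mySplit_ne_nil t)
            | cons p ps => simp [mySplit, hm]
          · rw [PySem.Chars.splitOn.go]
            rw [if_neg (by simp [List.isPrefixOf]; exact fun h' => hc h'.symm)]
            rw [ih t (c :: cur) acc (by simp at h; omega)]
            cases hm : mySplit t with
            | nil => exact absurd hm (mySplit_ne_nil t)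
            | cons p ps =>
                simp only [mySplit, if_neg hc, hm]
                simp

theorem splitOn_eq_mySplit (l : List Char) :
    PySem.Chars.splitOn l ['"'] = mySplit l := by
  rw [PySem.Chars.splitOn, go_eq (l.length + 1) l [] [] (Nat.lt_succ_self _)]
  cases hm : mySplit l with
  | nil => exact absurd hm (mySplit_ne_nil l)
  | cons p ps => simp

-- A's loop, output-only form
def outA : Bool → List Char → List Char
  | _, [] => []
  | b, c :: t =>
      if c = '"' then (if b then ['{', '\\', 'i', '}', '"'] else ['"', '{', 'i', '}']) ++ outA (!b) t
      else c :: outA b t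

-- B's tag interleaving, boolean form
def rep : Bool → List (List Char) → List Char
  | _, [] => []
  | b, p :: ps => (if b then ['{', '\\', 'i', '}', '"'] else ['"', '{', 'i', '}']) ++ p ++ rep (!b) ps

theorem foldlA_eq (l : List Char) (b : Bool) (res : List Char) :
    (l.foldl stepA (b, res)).2 = res ++ outA b l := by
  induction l generalizing b res with
  | nil => simp [outA]
  | cons c t ih =>
      rw [List.foldl_cons]
      by_cases hc : c = '"'
      · subst hc
        cases b <;>
          simp [stepA, outA, ih, List.append_assoc]
      · have hs : stepA (b, res) c = (b, res ++ [c]) := by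
          simp [stepA, hc]
        rw [hs, ih]
        simp [outA, hc]

theorem outA_eq_rep (l : List Char) (b : Bool) :
    outA b l = (mySplit l).headI ++ rep b (mySplit l).tail := by
  induction l generalizing b with
  | nil => simp [outA, mySplit, rep]
  | cons c t ih =>
      by_cases hc : c = '"'
      · subst hc
        cases hm : mySplit t with
        | nil => exact absurd hm (mySplit_ne_nil t)
        | cons p ps =>
            have h2 := ih (!b)
            rw [hm] at h2
            simp [outA, mySplit, hm, h2, rep, List.append_assoc]
      · cases hm : mySplit t with
        | nil => exact absurd hm (mySplit_ne_nil t)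
        | cons p ps =>
            have h2 := ih b
            rw [hm] at h2
            simp [outA, mySplit, hc, hm, h2]

theorem join_enumerate_eq_rep (rest : List (List Char)) (j : Int) (hj : 0 ≤ j) :
    PySem.Chars.join []
      ((PySem.List.enumerate rest j).map
        (fun jp => (if jp.1 % 2 == 0 then ['"', '{', 'i', '}'] else ['{', '\\', 'i', '}', '"']) ++ jp.2)) =
    rep (!(j % 2 == 0)) rest := by
  induction rest generalizing j with
  | nil => simp [PySem.List.enumerate_nil, PySem.Chars.join, List.intercalate, rep]
  | cons p ps ih =>
      have hflip : (!((j + 1) % 2 == 0)) = !(!(j % 2 == 0)) := by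
        have h0 : j % 2 = 0 ∨ j % 2 = 1 := Int.emod_two_eq_zero_or_one j
        have h1 : (j + 1) % 2 = (j % 2 + 1) % 2 := by omega
        rcases h0 with h0 | h0 <;> simp [h1, h0]
      cases ps with
      | nil =>
          rw [PySem.List.enumerate_cons, List.map_cons, PySem.List.enumerate_nil,
            List.map_nil, PySem.Chars.join_singleton]
          cases hb : (j % 2 == 0) <;> simp [rep]
      | cons q qs =>
          have h3 := ih (j + 1) (by omega)
          rw [PySem.List.enumerate_cons, List.map_cons] at h3
          rw [PySem.List.enumerate_cons, List.map_cons, PySem.List.enumerate_cons,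
            List.map_cons, PySem.Chars.join_cons_cons, h3, hflip]
          cases hb : (j % 2 == 0) <;> simp [rep]

-- ===== VERDICT (by name: the statement is the Claim_ definition above) =====
theorem italicize_spec : Claim_equal_italicize := by
  intro s _
  obtain ⟨first, restp, hm⟩ : ∃ f r, mySplit s.toList = f :: r := by
    cases h : mySplit s.toList with
    | nil => exact absurd h (mySplit_ne_nil _)
    | cons a b => exact ⟨a, b, rfl⟩
  unfold Spec_italicize italicize italicize_alt
  rw [splitOn_eq_mySplit, hm, foldlA_eq, outA_eq_rep, hm]
  have hj := join_enumerate_eq_rep restp 0 (by norm_num)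
  rw [show (!((0 : Int) % 2 == 0)) = false from by decide] at hj
  simp only [List.headI, List.tail, List.nil_append, hj]
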